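-- pv_equiv track=rewrite | github.com/bobcaoge/my-code | python/leetcode/1406_Stone_Game_III.py | stoneGameIII_1
-- ===== SOURCE A (Python) =====
-- import functools
--
-- def stoneGameIII_1(stoneValue):
--     """
--     :type stoneValue: List[int]
--     :rtype: str
--     """
--     memo = {}
--     @functools.lru_cache(None)
--     def get(i, score_of_alice, score_of_bob, flag):
--         if memo.get((score_of_alice, score_of_bob, flag, i), -1000) == -1000:
--
--             if i >= len(stoneValue):
--                 return 1 if score_of_alice > score_of_bob else 0 if score_of_alice == score_of_bob else -1
--             ret = -1 if flag else 1
--             for j in range(i, min(3+i, len(stoneValue))):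
--                 res = get(j+1,
--                        score_of_alice+(sum(stoneValue[i:j+1]) if flag else 0),
--                        score_of_bob+(sum(stoneValue[i:j+1]) if not flag else 0),
--                        not flag)
--                 if flag:
--                     ret = max(ret, res)
--                     if res == 1:
--                         break
--                 if not flag:
--                     ret = min(ret, res)
--                     if res == -1:
--                         break
--
--             memo[(score_of_alice, score_of_bob, flag, i)] = ret
--         return memo[(score_of_alice, score_of_bob, flag, i)]
--     m = {1:"Alice",
--          0:"Tie",
--          -1:"Bob"}
--     flag = get(0, 0, 0, True)
--     return m[flag]
-- ===== SOURCE B (Python) =====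
-- def stoneGameIII_1(stoneValue):
--     """
--     :type stoneValue: List[int]
--     :rtype: str
--     """
--     # Suffix DP on the score difference, one right-to-left pass, O(n) time O(1) space.
--     # d1,d2,d3 are dp[i+1],dp[i+2],dp[i+3]; a1,a2 are stoneValue[i+1],stoneValue[i+2]
--     # (zero-padded past the end, which coincides with taking all remaining stones).
--     d1 = d2 = d3 = 0
--     a1 = a2 = 0
--     for a in reversed(stoneValue):
--         d = max(a - d1, a + a1 - d2, a + a1 + a2 - d3)
--         d1, d2, d3 = d, d1, d2
--         a1, a2 = a, a1
--     if d1 > 0: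
--         return "Alice"
--     if d1 < 0:
--         return "Bob"
--     return "Tie"
-- ===== Notes on version B (the rewrite author's own statement) =====
-- stated objective: faster
-- what changed: Replaces A's memoized 4-argument game-tree recursion over (index, alice_score, bob_score, turn) with a single right-to-left suffix-DP pass on the score difference using O(1) rolling state.
import Mathlib
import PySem

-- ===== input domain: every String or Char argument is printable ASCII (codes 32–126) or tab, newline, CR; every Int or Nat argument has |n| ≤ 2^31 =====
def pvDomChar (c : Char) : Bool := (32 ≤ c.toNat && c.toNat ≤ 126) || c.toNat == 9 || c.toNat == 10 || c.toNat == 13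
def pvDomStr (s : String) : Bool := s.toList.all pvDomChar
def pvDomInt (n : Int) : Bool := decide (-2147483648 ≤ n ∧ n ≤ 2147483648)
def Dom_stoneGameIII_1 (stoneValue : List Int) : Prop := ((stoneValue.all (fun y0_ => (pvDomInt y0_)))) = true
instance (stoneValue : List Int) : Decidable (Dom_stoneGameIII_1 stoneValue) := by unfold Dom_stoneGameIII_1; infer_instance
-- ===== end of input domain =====

-- B replaces A's exponential 4-argument game search with one right-to-left suffix
-- DP pass on the score difference; same return value on every input.

-- ===== PORT A =====
-- A's memo dict / lru_cache only cache the results of a pure recursion; they never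
-- change a returned value, so the port is the same recursion without the cache.
mutual
def pvAGet (sv : List Int) (fuel : Nat) (i : Nat) (sa sb : Int) (flag : Bool) : Int :=
  match fuel with
  | 0 => 0  -- never reached: every call keeps fuel above the remaining recursion depth
  | fuel + 1 =>
    if sv.length ≤ i then
      (if sa > sb then 1 else if sa = sb then 0 else -1)
    else
      pvALoop sv fuel i i (if flag then -1 else 1) sa sb flag

def pvALoop (sv : List Int) (fuel : Nat) (i j : Nat) (ret sa sb : Int) (flag : Bool) : Int :=
  match fuel with
  | 0 => ret  -- never reached
  | fuel + 1 =>
    if j < min (3 + i) sv.length then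
      -- s = sum(stoneValue[i:j+1]); exact, since 0 ≤ i ≤ j < len(stoneValue)
      let s := ((sv.drop i).take (j + 1 - i)).sum
      let res := pvAGet sv fuel (j + 1) (sa + (if flag then s else 0))
                   (sb + (if flag then 0 else s)) (!flag)
      if flag then
        let ret' := max ret res
        if res = 1 then ret' else pvALoop sv fuel i (j + 1) ret' sa sb flag
      else
        let ret' := min ret res
        if res = -1 then ret' else pvALoop sv fuel i (j + 1) ret' sa sb flag
    else ret
end

def stoneGameIII_1 (stoneValue : List Int) : String :=
  let flag := pvAGet stoneValue (2 * stoneValue.length + 1) 0 0 0 true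
  -- m[flag] with m = {1:"Alice", 0:"Tie", -1:"Bob"}; get always returns -1/0/1, so exact
  if flag = 1 then "Alice" else if flag = 0 then "Tie" else "Bob"

-- ===== PORT B =====
def stoneGameIII_1_alt (stoneValue : List Int) : String :=
  let st := stoneValue.reverse.foldl
    (fun (st : Int × Int × Int × Int × Int) a =>
      let (d1, d2, d3, a1, a2) := st
      let d := max (a - d1) (max (a + a1 - d2) (a + a1 + a2 - d3))
      (d, d1, d2, a, a1))
    (0, 0, 0, 0, 0)
  if st.1 > 0 then "Alice" else if st.1 < 0 then "Bob" else "Tie"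

-- ===== PRECONDITION & SPEC =====
def Spec_stoneGameIII_1 (stoneValue : List Int) (out : String) : Prop := out = stoneGameIII_1_alt stoneValue
instance (stoneValue : List Int) (out : String) : Decidable (Spec_stoneGameIII_1 stoneValue out) := by unfold Spec_stoneGameIII_1; infer_instance

-- ===== CLAIM (what is proved, stated in full; the proofs are below) =====
def Claim_equal_stoneGameIII_1 : Prop := ∀ (stoneValue : List Int), Dom_stoneGameIII_1 stoneValue → Spec_stoneGameIII_1 stoneValue (stoneGameIII_1 stoneValue)

-- ===== LEMMAS AND PROOFS =====

def pvDp : List Int → Int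
  | [] => 0
  | a :: l =>
      max (a - pvDp l)
        (max (a + l.headD 0 - pvDp l.tail)
             (a + l.headD 0 + l.tail.headD 0 - pvDp l.tail.tail))
termination_by l => l.length
decreasing_by all_goals simp [List.length_tail] <;> omega

def pvSgn (x : Int) : Int := if 0 < x then 1 else if x = 0 then 0 else -1

lemma pvSgn_le_one (x : Int) : pvSgn x ≤ 1 := by simp only [pvSgn]; split_ifs <;> omega
lemma neg_one_le_pvSgn (x : Int) : -1 ≤ pvSgn x := by simp only [pvSgn]; split_ifs <;> omega
lemma pvSgn_eq_one_iff (x : Int) : pvSgn x = 1 ↔ 0 < x := by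
  simp only [pvSgn]; split_ifs with h1 h2
  · simp [h1]
  · simp [h2]
  · constructor
    · intro h; exact absurd h (by decide)
    · intro h; omega
lemma pvSgn_eq_neg_one_iff (x : Int) : pvSgn x = -1 ↔ x < 0 := by
  simp only [pvSgn]; split_ifs with h1 h2
  · constructor
    · intro h; exact absurd h (by decide)
    · intro h; omega
  · constructor
    · intro h; exact absurd h (by decide)
    · intro h; omega
  · constructor
    · intro _; omega
    · intro _; rfl
lemma pvSgn_max (a b : Int) : max (pvSgn a) (pvSgn b) = pvSgn (max a b) := by
  simp only [pvSgn, max_def]; split_ifs <;> omega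
lemma pvSgn_min (a b : Int) : min (pvSgn a) (pvSgn b) = pvSgn (min a b) := by
  simp only [pvSgn, min_def]; split_ifs <;> omega

lemma pvDp_char (t : List Int) (h : t ≠ []) :
    pvDp t = max ((t.take 1).sum - pvDp (t.drop 1))
      (max ((t.take 2).sum - pvDp (t.drop 2)) ((t.take 3).sum - pvDp (t.drop 3))) := by
  match t with
  | [a] => simp [pvDp]
  | [a, b] => simp [pvDp]; try ring_nf
  | a :: b :: c :: l => simp [pvDp]; try ring_nf

lemma pvB_foldl (sv : List Int) :
    sv.reverse.foldl
      (fun (st : Int × Int × Int × Int × Int) a =>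
        let (d1, d2, d3, a1, a2) := st
        let d := max (a - d1) (max (a + a1 - d2) (a + a1 + a2 - d3))
        (d, d1, d2, a, a1))
      (0, 0, 0, 0, 0)
    = (pvDp sv, pvDp sv.tail, pvDp sv.tail.tail, sv.headD 0, sv.tail.headD 0) := by
  induction sv with
  | nil => simp [pvDp]
  | cons a l ih =>
      rw [List.reverse_cons, List.foldl_append, ih]
      simp only [List.foldl_cons, List.foldl_nil, List.tail_cons, List.headD_cons]
      conv_rhs => rw [pvDp]


lemma pvALoop_stop (sv : List Int) (fuel i j : Nat) (ret sa sb : Int) (flag : Bool)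
    (h : ¬ j < min (3 + i) sv.length) : pvALoop sv fuel i j ret sa sb flag = ret := by
  cases fuel <;> simp [pvALoop, h]

lemma pvALoop_true_step (sv : List Int) (fuel i j : Nat) (ret sa sb : Int)
    (h : j < min (3 + i) sv.length) :
    pvALoop sv (fuel + 1) i j ret sa sb true =
      if pvAGet sv fuel (j + 1) (sa + ((sv.drop i).take (j + 1 - i)).sum) sb false = 1
      then max ret (pvAGet sv fuel (j + 1) (sa + ((sv.drop i).take (j + 1 - i)).sum) sb false)
      else pvALoop sv fuel i (j + 1)
        (max ret (pvAGet sv fuel (j + 1) (sa + ((sv.drop i).take (j + 1 - i)).sum) sb false)) sa sb true := by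
  rw [pvALoop]
  simp [h]

lemma pvALoop_false_step (sv : List Int) (fuel i j : Nat) (ret sa sb : Int)
    (h : j < min (3 + i) sv.length) :
    pvALoop sv (fuel + 1) i j ret sa sb false =
      if pvAGet sv fuel (j + 1) sa (sb + ((sv.drop i).take (j + 1 - i)).sum) true = -1
      then min ret (pvAGet sv fuel (j + 1) sa (sb + ((sv.drop i).take (j + 1 - i)).sum) true)
      else pvALoop sv fuel i (j + 1)
        (min ret (pvAGet sv fuel (j + 1) sa (sb + ((sv.drop i).take (j + 1 - i)).sum) true)) sa sb false := by
  rw [pvALoop]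
  simp [h]

lemma pv_leaf1_max (sa sb S1 D1 : Int) :
    max (-1) (pvSgn (sa + S1 - sb - D1)) = pvSgn (sa - sb + (S1 - D1)) := by
  rw [max_eq_right (neg_one_le_pvSgn _)]; congr 1; ring

lemma pv_leaf2_max (sa sb S1 D1 S2 D2 : Int) :
    max (max (-1) (pvSgn (sa + S1 - sb - D1))) (pvSgn (sa + S2 - sb - D2))
      = pvSgn (sa - sb + max (S1 - D1) (S2 - D2)) := by
  have e2 : sa + S2 - sb - D2 = sa - sb + (S2 - D2) := by ring
  rw [pv_leaf1_max, e2, pvSgn_max, max_add_add_left]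

lemma pv_leaf3_max (sa sb S1 D1 S2 D2 S3 D3 : Int) :
    max (max (max (-1) (pvSgn (sa + S1 - sb - D1))) (pvSgn (sa + S2 - sb - D2)))
        (pvSgn (sa + S3 - sb - D3))
      = pvSgn (sa - sb + max (S1 - D1) (max (S2 - D2) (S3 - D3))) := by
  have e3 : sa + S3 - sb - D3 = sa - sb + (S3 - D3) := by ring
  rw [pv_leaf2_max, e3, pvSgn_max, max_add_add_left, max_assoc]

lemma pv_brk_max (sa sb S D M r : Int) (h : pvSgn (sa + S - sb - D) = 1)
    (hle : S - D ≤ M) (hr : r ≤ 1) :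
    max r (pvSgn (sa + S - sb - D)) = pvSgn (sa - sb + M) := by
  rw [h, max_eq_right hr, eq_comm, pvSgn_eq_one_iff]
  rw [pvSgn_eq_one_iff] at h; omega

lemma pv_leaf1_min (sa sb S1 D1 : Int) :
    min 1 (pvSgn (sa - (sb + S1) + D1)) = pvSgn (sa - sb - (S1 - D1)) := by
  rw [min_eq_right (pvSgn_le_one _)]; congr 1; ring

lemma pv_leaf2_min (sa sb S1 D1 S2 D2 : Int) :
    min (min 1 (pvSgn (sa - (sb + S1) + D1))) (pvSgn (sa - (sb + S2) + D2))
      = pvSgn (sa - sb - max (S1 - D1) (S2 - D2)) := by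
  have e2 : sa - (sb + S2) + D2 = sa - sb - (S2 - D2) := by ring
  rw [pv_leaf1_min, e2, pvSgn_min, min_sub_sub_left]

lemma pv_leaf3_min (sa sb S1 D1 S2 D2 S3 D3 : Int) :
    min (min (min 1 (pvSgn (sa - (sb + S1) + D1))) (pvSgn (sa - (sb + S2) + D2)))
        (pvSgn (sa - (sb + S3) + D3))
      = pvSgn (sa - sb - max (S1 - D1) (max (S2 - D2) (S3 - D3))) := by
  have e3 : sa - (sb + S3) + D3 = sa - sb - (S3 - D3) := by ring
  rw [pv_leaf2_min, e3, pvSgn_min, min_sub_sub_left, max_assoc]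

lemma pv_brk_min (sa sb S D M r : Int) (h : pvSgn (sa - (sb + S) + D) = -1)
    (hle : S - D ≤ M) (hr : -1 ≤ r) :
    min r (pvSgn (sa - (sb + S) + D)) = pvSgn (sa - sb - M) := by
  rw [h, min_eq_right hr, eq_comm, pvSgn_eq_neg_one_iff]
  rw [pvSgn_eq_neg_one_iff] at h; omega

lemma pvAGet_sgn (sv : List Int) : ∀ (fuel i : Nat) (sa sb : Int), 2 * (sv.length - i) < fuel →
    pvAGet sv fuel i sa sb true = pvSgn (sa - sb + pvDp (sv.drop i)) ∧
    pvAGet sv fuel i sa sb false = pvSgn (sa - sb - pvDp (sv.drop i)) := by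
  intro fuel
  induction fuel using Nat.strong_induction_on with
  | _ fuel ih =>
  intro i sa sb hf
  obtain ⟨f, rfl⟩ : ∃ f, fuel = f + 1 := ⟨fuel - 1, by omega⟩
  by_cases hi : sv.length ≤ i
  · constructor
    · simp only [pvAGet]
      rw [if_pos hi, List.drop_eq_nil_of_le hi]
      simp only [pvDp, pvSgn]
      split_ifs <;> omega
    · simp only [pvAGet]
      rw [if_pos hi, List.drop_eq_nil_of_le hi]
      simp only [pvDp, pvSgn]
      split_ifs <;> omega
  · obtain ⟨g, rfl⟩ : ∃ g, f = g + 1 := ⟨f - 1, by omega⟩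
    have hne : sv.drop i ≠ [] := by
      intro h
      have := congrArg List.length h
      simp at this
      omega
    have hlen : (sv.drop i).length = sv.length - i := by simp
    have hchar := pvDp_char (sv.drop i) hne
    have hd1 : (sv.drop i).drop 1 = sv.drop (i + 1) := by
      rw [List.drop_drop]
    have hd2 : (sv.drop i).drop 2 = sv.drop (i + 2) := by
      rw [List.drop_drop]
    have hd3 : (sv.drop i).drop 3 = sv.drop (i + 3) := by
      rw [List.drop_drop]
    rw [hd1, hd2, hd3] at hchar
    constructor
    · -- flag = true
      simp only [pvAGet]
      rw [if_neg hi]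
      rw [show (if True then (-1 : Int) else 1) = -1 from if_pos trivial]
      rw [pvALoop_true_step sv g i i _ sa sb (by omega)]
      simp only [show i + 1 - i = 1 from by omega]
      rw [(ih g (by omega) (i + 1) (sa + ((sv.drop i).take 1).sum) sb (by omega)).2]
      by_cases h1 : pvSgn (sa + ((sv.drop i).take 1).sum - sb - pvDp (sv.drop (i + 1))) = 1
      · rw [if_pos h1, hchar]
        exact pv_brk_max _ _ _ _ _ _ h1 (le_max_left _ _) (by norm_num)
      · rw [if_neg h1]
        by_cases hn2 : i + 2 ≤ sv.length
        · obtain ⟨g1, hg1⟩ : ∃ g1, g = g1 + 1 := ⟨g - 1, by omega⟩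
          subst hg1
          rw [pvALoop_true_step sv g1 i (i + 1) _ sa sb (by omega)]
          simp only [show i + 1 + 1 - i = 2 from by omega]
          rw [(ih g1 (by omega) (i + 2) (sa + ((sv.drop i).take 2).sum) sb (by omega)).2]
          by_cases h2 : pvSgn (sa + ((sv.drop i).take 2).sum - sb - pvDp (sv.drop (i + 2))) = 1
          · rw [if_pos h2, hchar]
            exact pv_brk_max _ _ _ _ _ _ h2
              (le_trans (le_max_left _ _) (le_max_right _ _))
              (max_le (by norm_num) (pvSgn_le_one _))
          · rw [if_neg h2]
            by_cases hn3 : i + 3 ≤ sv.length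
            · obtain ⟨g2, hg2⟩ : ∃ g2, g1 = g2 + 1 := ⟨g1 - 1, by omega⟩
              subst hg2
              rw [pvALoop_true_step sv g2 i (i + 2) _ sa sb (by omega)]
              simp only [show i + 2 + 1 - i = 3 from by omega]
              rw [(ih g2 (by omega) (i + 3) (sa + ((sv.drop i).take 3).sum) sb (by omega)).2]
              by_cases h3 : pvSgn (sa + ((sv.drop i).take 3).sum - sb - pvDp (sv.drop (i + 3))) = 1
              · rw [if_pos h3, hchar]
                exact pv_brk_max _ _ _ _ _ _ h3
                  (le_trans (le_max_right _ _) (le_max_right _ _))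
                  (max_le (max_le (by norm_num) (pvSgn_le_one _)) (pvSgn_le_one _))
              · rw [if_neg h3, pvALoop_stop sv g2 i (i + 3) _ sa sb true (by omega), hchar]
                exact pv_leaf3_max _ _ _ _ _ _ _ _
            · -- length = i + 2 : the third take/drop clamp to the second
              rw [pvALoop_stop sv g1 i (i + 2) _ sa sb true (by omega)]
              have ht3 : (sv.drop i).take 3 = (sv.drop i).take 2 := by
                rw [List.take_of_length_le (by omega), List.take_of_length_le (by omega)]
              have hdr3 : sv.drop (i + 3) = sv.drop (i + 2) := by
                rw [List.drop_eq_nil_of_le (by omega), List.drop_eq_nil_of_le (by omega)]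
              rw [ht3, hdr3, max_self] at hchar
              rw [hchar]
              exact pv_leaf2_max _ _ _ _ _ _
        · -- length = i + 1 : everything clamps to the first step
          rw [pvALoop_stop sv g i (i + 1) _ sa sb true (by omega)]
          have ht2 : (sv.drop i).take 2 = (sv.drop i).take 1 := by
            rw [List.take_of_length_le (by omega), List.take_of_length_le (by omega)]
          have ht3 : (sv.drop i).take 3 = (sv.drop i).take 1 := by
            rw [List.take_of_length_le (by omega), List.take_of_length_le (by omega)]
          have hdr2 : sv.drop (i + 2) = sv.drop (i + 1) := by
            rw [List.drop_eq_nil_of_le (by omega), List.drop_eq_nil_of_le (by omega)]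
          have hdr3 : sv.drop (i + 3) = sv.drop (i + 1) := by
            rw [List.drop_eq_nil_of_le (by omega), List.drop_eq_nil_of_le (by omega)]
          rw [ht2, ht3, hdr2, hdr3, max_self, max_self] at hchar
          rw [hchar]
          exact pv_leaf1_max _ _ _ _
    · -- flag = false
      simp only [pvAGet]
      rw [if_neg hi]
      rw [show (if false = true then (-1 : Int) else 1) = 1 from if_neg (by simp)]
      rw [pvALoop_false_step sv g i i _ sa sb (by omega)]
      simp only [show i + 1 - i = 1 from by omega]
      rw [(ih g (by omega) (i + 1) sa (sb + ((sv.drop i).take 1).sum) (by omega)).1]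
      by_cases h1 : pvSgn (sa - (sb + ((sv.drop i).take 1).sum) + pvDp (sv.drop (i + 1))) = -1
      · rw [if_pos h1, hchar]
        exact pv_brk_min _ _ _ _ _ _ h1 (le_max_left _ _) (by norm_num)
      · rw [if_neg h1]
        by_cases hn2 : i + 2 ≤ sv.length
        · obtain ⟨g1, hg1⟩ : ∃ g1, g = g1 + 1 := ⟨g - 1, by omega⟩
          subst hg1
          rw [pvALoop_false_step sv g1 i (i + 1) _ sa sb (by omega)]
          simp only [show i + 1 + 1 - i = 2 from by omega]
          rw [(ih g1 (by omega) (i + 2) sa (sb + ((sv.drop i).take 2).sum) (by omega)).1]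
          by_cases h2 : pvSgn (sa - (sb + ((sv.drop i).take 2).sum) + pvDp (sv.drop (i + 2))) = -1
          · rw [if_pos h2, hchar]
            exact pv_brk_min _ _ _ _ _ _ h2
              (le_trans (le_max_left _ _) (le_max_right _ _))
              (le_min (by norm_num) (neg_one_le_pvSgn _))
          · rw [if_neg h2]
            by_cases hn3 : i + 3 ≤ sv.length
            · obtain ⟨g2, hg2⟩ : ∃ g2, g1 = g2 + 1 := ⟨g1 - 1, by omega⟩
              subst hg2
              rw [pvALoop_false_step sv g2 i (i + 2) _ sa sb (by omega)]
              simp only [show i + 2 + 1 - i = 3 from by omega]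
              rw [(ih g2 (by omega) (i + 3) sa (sb + ((sv.drop i).take 3).sum) (by omega)).1]
              by_cases h3 : pvSgn (sa - (sb + ((sv.drop i).take 3).sum) + pvDp (sv.drop (i + 3))) = -1
              · rw [if_pos h3, hchar]
                exact pv_brk_min _ _ _ _ _ _ h3
                  (le_trans (le_max_right _ _) (le_max_right _ _))
                  (le_min (le_min (by norm_num) (neg_one_le_pvSgn _)) (neg_one_le_pvSgn _))
              · rw [if_neg h3, pvALoop_stop sv g2 i (i + 3) _ sa sb false (by omega), hchar]
                exact pv_leaf3_min _ _ _ _ _ _ _ _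
            · rw [pvALoop_stop sv g1 i (i + 2) _ sa sb false (by omega)]
              have ht3 : (sv.drop i).take 3 = (sv.drop i).take 2 := by
                rw [List.take_of_length_le (by omega), List.take_of_length_le (by omega)]
              have hdr3 : sv.drop (i + 3) = sv.drop (i + 2) := by
                rw [List.drop_eq_nil_of_le (by omega), List.drop_eq_nil_of_le (by omega)]
              rw [ht3, hdr3, max_self] at hchar
              rw [hchar]
              exact pv_leaf2_min _ _ _ _ _ _
        · rw [pvALoop_stop sv g i (i + 1) _ sa sb false (by omega)]
          have ht2 : (sv.drop i).take 2 = (sv.drop i).take 1 := by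
            rw [List.take_of_length_le (by omega), List.take_of_length_le (by omega)]
          have ht3 : (sv.drop i).take 3 = (sv.drop i).take 1 := by
            rw [List.take_of_length_le (by omega), List.take_of_length_le (by omega)]
          have hdr2 : sv.drop (i + 2) = sv.drop (i + 1) := by
            rw [List.drop_eq_nil_of_le (by omega), List.drop_eq_nil_of_le (by omega)]
          have hdr3 : sv.drop (i + 3) = sv.drop (i + 1) := by
            rw [List.drop_eq_nil_of_le (by omega), List.drop_eq_nil_of_le (by omega)]
          rw [ht2, ht3, hdr2, hdr3, max_self, max_self] at hchar
          rw [hchar]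
          exact pv_leaf1_min _ _ _ _

-- ===== VERDICT (by name: the statement is the Claim_ definition above) =====
theorem stoneGameIII_1_spec : Claim_equal_stoneGameIII_1 := by
  intro sv _
  unfold Spec_stoneGameIII_1 stoneGameIII_1 stoneGameIII_1_alt
  rw [pvB_foldl]
  have h := (pvAGet_sgn sv (2 * sv.length + 1) 0 0 0 (by omega)).1
  simp only [List.drop_zero] at h
  simp only [h]
  rw [show (0:ℤ) - 0 + pvDp sv = pvDp sv from by ring]
  rcases lt_trichotomy (pvDp sv) 0 with hc | hc | hc
  · rw [show pvSgn (pvDp sv) = -1 from by rw [pvSgn_eq_neg_one_iff]; omega]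
    norm_num
    rw [if_neg (by omega), if_pos hc]
  · rw [show pvSgn (pvDp sv) = 0 from by simp only [pvSgn]; split_ifs <;> omega]
    norm_num
    rw [if_neg (by omega), if_neg (by omega)]
  · rw [show pvSgn (pvDp sv) = 1 from by rw [pvSgn_eq_one_iff]; omega]
    norm_num
    intro h'
    exact absurd h' (by omega)
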